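-- pv_equiv track=rewrite | github.com/usandomir-frba/NanoVNA-UTN-Toolkit | tests/test_frequency_formatting.py | limit_frequency_input_old
-- ===== SOURCE A (Python) =====
-- def limit_frequency_input_old(text, max_digits=3, max_decimals=2):
--     """Frequency input limiter with old limits (3 digits, 2 decimals) for comparison."""
--     filtered = "".join(c for c in text if c.isdigit() or c == ".")
--
--     if filtered.count(".") > 1:
--         parts = filtered.split(".", 1)
--         filtered = parts[0] + "." + "".join(parts[1:]).replace(".", "")
--
--     if "." in filtered:
--         integer_part, decimal_part = filtered.split(".", 1)
--         integer_part = integer_part[:max_digits]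
--         decimal_part = decimal_part[:max_decimals]
--         filtered = integer_part + "." + decimal_part
--     else:
--         filtered = filtered[:max_digits]
--
--     return filtered
-- ===== SOURCE B (Python) =====
-- def limit_frequency_input_old(text, max_digits=3, max_decimals=2):
--     """Single left-to-right pass: keep digits against an integer/decimal budget,
--     keep only the first dot, ignore everything else."""
--     out = []
--     seen_dot = False
--     int_count = 0
--     dec_count = 0
--     for c in text:
--         if c == ".":
--             if not seen_dot:
--                 seen_dot = True
--                 out.append(".")
--         elif c.isdigit():
--             if seen_dot:
--                 if dec_count < max_decimals:
--                     out.append(c)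
--                     dec_count += 1
--             else:
--                 if int_count < max_digits:
--                     out.append(c)
--                     int_count += 1
--     return "".join(out)
-- ===== Notes on version B (the rewrite author's own statement) =====
-- stated objective: alternative
-- what changed: Replaced A's multi-phase pipeline (filter-join, dot-count/split/replace merge, split and slice-truncate) by a single left-to-right pass that keeps a seen-dot flag and two digit budgets, building the result directly.
-- outside the precondition, e.g. on limit_frequency_input_old('12', -1, 2): A returns '1', B returns ''; on limit_frequency_input_old('1.234', 3, -1): A returns '1.23', B returns '1.'
import Mathlib
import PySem

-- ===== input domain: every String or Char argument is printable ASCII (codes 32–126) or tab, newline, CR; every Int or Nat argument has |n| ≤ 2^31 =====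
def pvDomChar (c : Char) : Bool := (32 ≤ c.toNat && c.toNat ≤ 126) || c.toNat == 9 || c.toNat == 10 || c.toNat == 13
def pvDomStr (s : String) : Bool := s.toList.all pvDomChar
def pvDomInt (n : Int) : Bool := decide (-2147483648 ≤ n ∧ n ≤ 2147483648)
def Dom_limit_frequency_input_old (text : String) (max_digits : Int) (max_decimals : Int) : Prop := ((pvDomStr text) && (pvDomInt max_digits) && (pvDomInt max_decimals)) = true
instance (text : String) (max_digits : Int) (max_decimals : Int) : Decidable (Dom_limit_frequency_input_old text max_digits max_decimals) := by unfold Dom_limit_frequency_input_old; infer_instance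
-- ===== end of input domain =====

-- B replaces A's multi-phase filter/split/replace/slice pipeline by one left-to-right pass
-- with a seen-dot flag and two digit budgets (objective: alternative decomposition, same O(n)).


-- ===== PORT A =====
def limit_frequency_input_old (text : String) (max_digits : Int) (max_decimals : Int) : String :=
  let filtered := text.toList.filter (fun c => PySem.Chars.isdigit c || c == '.')
  let filtered :=
    if PySem.Chars.count filtered ['.'] > 1 then
      let parts := PySem.Chars.splitOnMax filtered ['.'] 1
      PySem.List.pyGetD parts 0 [] ++ ['.'] ++
        PySem.Chars.replace (PySem.Chars.join [] (PySem.List.slice parts (some 1) none)) ['.'] []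
    else filtered
  let filtered :=
    if PySem.Chars.isIn ['.'] filtered then
      let parts := PySem.Chars.splitOnMax filtered ['.'] 1
      let integer_part := PySem.List.pyGetD parts 0 []
      let decimal_part := PySem.List.pyGetD parts 1 []
      PySem.List.slice integer_part none (some max_digits) ++ ['.'] ++
        PySem.List.slice decimal_part none (some max_decimals)
    else
      PySem.List.slice filtered none (some max_digits)
  String.ofList filtered

-- ===== PORT B =====
def pvAltGo (md mdec : Int) : List Char → Bool → Int → Int → List Char → List Char
  | [], _, _, _, acc => acc
  | c :: rest, seen, ic, dc, acc =>
    if c == '.' then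
      if seen then pvAltGo md mdec rest seen ic dc acc
      else pvAltGo md mdec rest true ic dc (acc ++ ['.'])
    else if PySem.Chars.isdigit c then
      if seen then
        if dc < mdec then pvAltGo md mdec rest seen ic (dc + 1) (acc ++ [c])
        else pvAltGo md mdec rest seen ic dc acc
      else
        if ic < md then pvAltGo md mdec rest seen (ic + 1) dc (acc ++ [c])
        else pvAltGo md mdec rest seen ic dc acc
    else pvAltGo md mdec rest seen ic dc acc

def limit_frequency_input_old_alt (text : String) (max_digits : Int) (max_decimals : Int) : String :=
  String.ofList (pvAltGo max_digits max_decimals text.toList false 0 0 [])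

-- ===== PRECONDITION & SPEC =====
-- Pre_ excludes negative limits, on which A's Python slice s[:n] truncates from the END
-- (negative-index slicing) — outside the function's natural domain of digit budgets.
def Pre_limit_frequency_input_old (text : String) (max_digits : Int) (max_decimals : Int) : Prop :=
  0 ≤ max_digits ∧ 0 ≤ max_decimals
instance (text : String) (max_digits : Int) (max_decimals : Int) : Decidable (Pre_limit_frequency_input_old text max_digits max_decimals) := by unfold Pre_limit_frequency_input_old; infer_instance
def pvWitness_limit_frequency_input_old : String × Int × Int := ("12.345", 3, 2)

def Spec_limit_frequency_input_old (text : String) (max_digits : Int) (max_decimals : Int) (out : String) : Prop := out = limit_frequency_input_old_alt text max_digits max_decimals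
instance (text : String) (max_digits : Int) (max_decimals : Int) (out : String) : Decidable (Spec_limit_frequency_input_old text max_digits max_decimals out) := by unfold Spec_limit_frequency_input_old; infer_instance

-- ===== CLAIM (what is proved, stated in full; the proofs are below) =====
def Claim_equal_limit_frequency_input_old : Prop := ∀ (text : String) (max_digits : Int) (max_decimals : Int), Dom_limit_frequency_input_old text max_digits max_decimals → Pre_limit_frequency_input_old text max_digits max_decimals → Spec_limit_frequency_input_old text max_digits max_decimals (limit_frequency_input_old text max_digits max_decimals)

-- ===== LEMMAS AND PROOFS =====
-- characterizations of the PySem string primitives at the single-char separator '.'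
lemma count_go_char (fuel : Nat) : ∀ (l : List Char) (acc : Nat), l.length ≤ fuel →
    PySem.Chars.count.go ['.'] fuel l acc = acc + l.count '.' := by
  induction fuel with
  | zero => intro l acc h; simp at h; subst h; simp [PySem.Chars.count.go]
  | succ n ih =>
    intro l acc h
    cases l with
    | nil => simp [PySem.Chars.count.go]
    | cons c t =>
      simp only [PySem.Chars.count.go, List.isPrefixOf]
      by_cases hc : c = '.'
      · subst hc
        rw [if_pos (by simp)]
        simp only [List.length_cons, List.length_nil, List.drop_succ_cons, List.drop_zero]
        rw [ih t (acc+1) (by simpa using Nat.le_of_succ_le_succ h)]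
        simp [List.count_cons]; omega
      · rw [if_neg (by simp [hc]; exact fun h' => absurd h'.symm hc)]
        rw [ih t acc (by simpa using Nat.le_of_succ_le_succ h)]
        simp [List.count_cons, eq_comm, hc]

lemma count_char' (l : List Char) : PySem.Chars.count l ['.'] = l.count '.' := by
  simp [PySem.Chars.count, count_go_char l.length l 0 le_rfl]

lemma replace_go_char (fuel : Nat) : ∀ (l acc : List Char), l.length ≤ fuel →
    PySem.Chars.replace.go ['.'] [] fuel l acc = acc.reverse ++ l.filter (· != '.') := by
  induction fuel with
  | zero => intro l acc h; simp at h; subst h; simp [PySem.Chars.replace.go]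
  | succ n ih =>
    intro l acc h
    cases l with
    | nil => simp [PySem.Chars.replace.go]
    | cons c t =>
      simp only [PySem.Chars.replace.go, List.isPrefixOf]
      by_cases hc : c = '.'
      · subst hc
        rw [if_pos (by simp)]
        simp only [List.length_cons, List.length_nil, List.drop_succ_cons, List.drop_zero,
          List.reverse_nil, List.nil_append]
        rw [ih t acc (by simpa using Nat.le_of_succ_le_succ h)]
        simp
      · rw [if_neg (by simp; exact fun h' => absurd h'.symm hc)]
        rw [ih t (c :: acc) (by simpa using Nat.le_of_succ_le_succ h)]
        simp [List.filter_cons, hc]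

lemma replace_char' (l : List Char) :
    PySem.Chars.replace l ['.'] [] = l.filter (· != '.') := by
  simp [PySem.Chars.replace, replace_go_char l.length l [] le_rfl]

lemma split_go_zero (fuel : Nat) (l cur : List Char) (acc : List (List Char)) :
    PySem.Chars.splitOnMax.go ['.'] fuel 0 l cur acc = ((cur.reverse ++ l) :: acc).reverse := by
  cases fuel with
  | zero => simp [PySem.Chars.splitOnMax.go]
  | succ n =>
    cases l with
    | nil => simp [PySem.Chars.splitOnMax.go]
    | cons c t => simp [PySem.Chars.splitOnMax.go]

lemma split_go_one (fuel : Nat) : ∀ (l cur : List Char) (acc : List (List Char)), l.length ≤ fuel →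
    PySem.Chars.splitOnMax.go ['.'] fuel 1 l cur acc =
      (if '.' ∈ l then
        ((l.dropWhile (· != '.')).tail :: (cur.reverse ++ l.takeWhile (· != '.')) :: acc).reverse
       else ((cur.reverse ++ l) :: acc).reverse) := by
  induction fuel with
  | zero => intro l cur acc h; simp at h; subst h; simp [PySem.Chars.splitOnMax.go]
  | succ n ih =>
    intro l cur acc h
    cases l with
    | nil => simp [PySem.Chars.splitOnMax.go]
    | cons c t =>
      simp only [PySem.Chars.splitOnMax.go, List.isPrefixOf]
      rw [if_neg (by omega)]
      by_cases hc : c = '.'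
      · subst hc
        rw [if_pos (by simp)]
        simp only [List.length_cons, List.length_nil, List.drop_succ_cons, List.drop_zero]
        rw [split_go_zero]
        simp [List.dropWhile_cons, List.takeWhile_cons]
      · rw [if_neg (by simp; exact fun h' => absurd h'.symm hc)]
        rw [ih t (c :: cur) acc (by simpa using Nat.le_of_succ_le_succ h)]
        by_cases hm : '.' ∈ t
        · rw [if_pos hm, if_pos (by simp [hm])]
          simp [List.dropWhile_cons, List.takeWhile_cons, hc]
        · rw [if_neg hm, if_neg (by simp [hm, Ne.symm]; exact fun h' => absurd h'.symm hc)]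
          simp

lemma split_one' (l : List Char) :
    PySem.Chars.splitOnMax l ['.'] 1 =
      (if '.' ∈ l then [l.takeWhile (· != '.'), (l.dropWhile (· != '.')).tail] else [l]) := by
  rw [PySem.Chars.splitOnMax, if_neg (by omega)]
  norm_num
  rw [split_go_one (l.length + 1) l [] [] (by omega)]
  split_ifs <;> simp

-- predicates and the common normal form both ports reduce to
def pvQ (c : Char) : Bool := PySem.Chars.isdigit c || c == '.'
def pvP (c : Char) : Bool := c != '.'

def pvForm (f : List Char) (d m : Nat) : List Char :=
  (f.takeWhile pvP).take d ++
    (if '.' ∈ f then '.' :: (((f.dropWhile pvP).tail).filter pvP).take m else [])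

-- helper: takeWhile / dropWhile across an appended first dot
lemma tw_append (u v : List Char) (hu : ∀ c ∈ u, pvP c = true) :
    (u ++ '.' :: v).takeWhile pvP = u ∧ (u ++ '.' :: v).dropWhile pvP = '.' :: v := by
  induction u with
  | nil => simp [List.takeWhile_cons, List.dropWhile_cons, pvP]
  | cons a u ih =>
    have ha : pvP a = true := hu a (by simp)
    have := ih (fun c hc => hu c (by simp [hc]))
    simp [List.takeWhile_cons, List.dropWhile_cons, ha, this.1, this.2]

lemma dropWhile_head (f : List Char) (h : '.' ∈ f) :
    f.dropWhile pvP = '.' :: (f.dropWhile pvP).tail := by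
  induction f with
  | nil => simp at h
  | cons c t ih =>
    by_cases hc : c = '.'
    · subst hc; simp [List.dropWhile_cons, pvP]
    · have hmem : '.' ∈ t := by cases h with
        | head => exact absurd rfl hc
        | tail _ h => exact h
      rw [List.dropWhile_cons, if_pos (by simp [pvP, hc])]
      exact ih hmem

lemma isIn_dot (l : List Char) : PySem.Chars.isIn ['.'] l = true ↔ '.' ∈ l := by
  rw [PySem.Chars.isIn_iff_infix]; exact List.singleton_infix_iff '.' l

lemma pvP_eq : (fun c : Char => c != '.') = pvP := rfl

lemma A_eq (text : String) (md mdec : Int) (h1 : 0 ≤ md) (h2 : 0 ≤ mdec) :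
    limit_frequency_input_old text md mdec =
      String.ofList (pvForm (text.toList.filter pvQ) md.toNat mdec.toNat) := by
  unfold limit_frequency_input_old
  have hq : (fun c => PySem.Chars.isdigit c || c == '.') = pvQ := rfl
  rw [hq]
  set f := text.toList.filter pvQ with hf
  have htwp : ∀ c ∈ f.takeWhile pvP, pvP c = true := fun c hc => List.mem_takeWhile_imp hc
  simp only [count_char']
  by_cases hgt : f.count '.' > 1
  · have hmem : '.' ∈ f := List.count_pos_iff.mp (by omega)
    rw [if_pos hgt, split_one', if_pos hmem, pvP_eq]
    rw [PySem.List.pyGetD_zero_cons, PySem.List.slice_from_one]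
    simp only [List.tail_cons]
    rw [PySem.Chars.join_singleton, replace_char', pvP_eq]
    set tw := f.takeWhile pvP
    set tl := (f.dropWhile pvP).tail
    have h2' := tw_append tw (tl.filter pvP) htwp
    rw [(by simp : tw ++ ['.'] ++ tl.filter pvP = tw ++ '.' :: tl.filter pvP)]
    rw [if_pos ((isIn_dot _).mpr (by simp))]
    rw [split_one', pvP_eq, if_pos (by simp : ('.':Char) ∈ tw ++ '.' :: tl.filter pvP)]
    rw [h2'.1, h2'.2]
    simp only [List.tail_cons, PySem.List.pyGetD_zero_cons]
    rw [(by simp [pysem] : PySem.List.pyGetD [tw, tl.filter pvP] 1 ([] : List Char) = tl.filter pvP)]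
    rw [PySem.List.slice_to _ h1, PySem.List.slice_to _ h2]
    simp [pvForm, hmem]
    rfl
  · rw [if_neg hgt]
    by_cases hmem : '.' ∈ f
    · rw [if_pos ((isIn_dot f).mpr hmem), split_one', pvP_eq, if_pos hmem]
      simp only [PySem.List.pyGetD_zero_cons]
      rw [(by simp [pysem] : PySem.List.pyGetD [f.takeWhile pvP, (f.dropWhile pvP).tail] 1 ([] : List Char) = (f.dropWhile pvP).tail)]
      rw [PySem.List.slice_to _ h1, PySem.List.slice_to _ h2]
      -- count ≤ 1 and '.' ∈ f → no dot in the tail after the first dot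
      have hsplit := List.takeWhile_append_dropWhile (p := pvP) (l := f)
      have hdw := dropWhile_head f hmem
      have hcnt : f.count '.' = (f.takeWhile pvP).count '.' + (f.dropWhile pvP).count '.' := by
        calc f.count '.' = ((f.takeWhile pvP) ++ (f.dropWhile pvP)).count '.' := by rw [hsplit]
          _ = _ := List.count_append ..
      have htw0 : (f.takeWhile pvP).count '.' = 0 := by
        rw [List.count_eq_zero]
        intro hmem'
        have := htwp _ hmem'
        simp [pvP] at this
      have htl0 : ((f.dropWhile pvP).tail).count '.' = 0 := by
        rw [hdw] at hcnt
        simp [List.count_cons, htw0] at hcnt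
        omega
      have : ((f.dropWhile pvP).tail).filter pvP = (f.dropWhile pvP).tail := by
        rw [List.filter_eq_self]
        intro c hc
        have : c ≠ '.' := by
          intro hEq; subst hEq
          exact absurd (List.count_eq_zero.mp htl0 hc) (fun h => h)
        simp [pvP, this]
      simp [pvForm, hmem, this]
    · rw [if_neg (fun h => hmem ((isIn_dot f).mp h))]
      rw [PySem.List.slice_to _ h1]
      have : f.takeWhile pvP = f := by
        rw [List.takeWhile_eq_self_iff]
        intro c hc
        have : c ≠ '.' := fun hEq => hmem (hEq ▸ hc)
        simp [pvP, this]
      simp [pvForm, hmem, this]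

lemma altGo_skip (md mdec : Int) : ∀ (cs : List Char) (seen : Bool) (ic dc : Int) (acc : List Char),
    pvAltGo md mdec cs seen ic dc acc = pvAltGo md mdec (cs.filter pvQ) seen ic dc acc := by
  intro cs
  induction cs with
  | nil => intros; rfl
  | cons c t ih =>
    intro seen ic dc acc
    by_cases hdot : c = '.'
    · subst hdot
      have hq : pvQ '.' = true := by decide
      cases seen <;> simp [pvAltGo, List.filter_cons, hq, ih]
    · by_cases hdig : PySem.Chars.isdigit c = true
      · have hq : pvQ c = true := by simp [pvQ, hdig]
        have hne : (c == '.') = false := by simp [hdot]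
        cases seen <;>
          simp only [pvAltGo, List.filter_cons, hq, hne, hdig, if_false, if_true, Bool.false_eq_true] <;>
          split_ifs <;> simp [pvAltGo, hne, hdig, ih]
      · have hq : pvQ c = false := by simp [pvQ, hdig, hdot]
        have hne : (c == '.') = false := by simp [hdot]
        simp [pvAltGo, List.filter_cons, hq, hne, hdig, ih]

lemma aux_true (md mdec : Int) : ∀ (f : List Char) (ic dc : Int) (acc : List Char),
    (∀ c ∈ f, pvQ c = true) →
    pvAltGo md mdec f true ic dc acc = acc ++ (f.filter pvP).take ((mdec - dc).toNat) := by
  intro f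
  induction f with
  | nil => intros; simp [pvAltGo]
  | cons c t ih =>
    intro ic dc acc hall
    have ht := fun c hc => hall c (List.mem_cons_of_mem _ hc)
    by_cases hdot : c = '.'
    · subst hdot
      simp only [pvAltGo, BEq.rfl, if_pos rfl, if_true]
      rw [ih ic dc acc ht]
      simp [List.filter_cons, pvP]
    · have hdig : PySem.Chars.isdigit c = true := by
        have := hall c (by simp)
        simp [pvQ, hdot] at this; exact this
      have hne : (c == '.') = false := by simp [hdot]
      have hpc : pvP c = true := by simp [pvP, hdot]
      simp only [pvAltGo, hne, Bool.false_eq_true, if_false, hdig, if_true]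
      by_cases hlt : dc < mdec
      · rw [if_pos hlt, ih _ _ _ ht]
        have : (mdec - dc).toNat = (mdec - (dc + 1)).toNat + 1 := by omega
        simp [List.filter_cons, hpc, this, List.take_succ_cons]
      · rw [if_neg hlt, ih _ _ _ ht]
        have h0 : (mdec - dc).toNat = 0 := by omega
        simp [List.filter_cons, hpc, h0]

lemma aux_false (md mdec : Int) : ∀ (f : List Char) (ic dc : Int) (acc : List Char),
    (∀ c ∈ f, pvQ c = true) →
    pvAltGo md mdec f false ic dc acc =
      acc ++ (f.takeWhile pvP).take ((md - ic).toNat) ++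
        (if '.' ∈ f then '.' :: (((f.dropWhile pvP).tail).filter pvP).take ((mdec - dc).toNat) else []) := by
  intro f
  induction f with
  | nil => intros; simp [pvAltGo]
  | cons c t ih =>
    intro ic dc acc hall
    have ht := fun c hc => hall c (List.mem_cons_of_mem _ hc)
    by_cases hdot : c = '.'
    · subst hdot
      simp only [pvAltGo, BEq.rfl, if_true, Bool.false_eq_true, if_false]
      rw [aux_true md mdec t ic dc _ ht]
      simp [List.takeWhile_cons, List.dropWhile_cons, pvP]
    · have hdig : PySem.Chars.isdigit c = true := by
        have := hall c (by simp)
        simp [pvQ, hdot] at this; exact this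
      have hne : (c == '.') = false := by simp [hdot]
      have hpc : pvP c = true := by simp [pvP, hdot]
      have hmem : ('.' ∈ c :: t) = ('.' ∈ t) := by
        simp only [List.mem_cons, eq_iff_iff]
        constructor
        · rintro (h | h)
          · exact absurd h.symm hdot
          · exact h
        · exact Or.inr
      simp only [pvAltGo, hne, Bool.false_eq_true, if_false, hdig, if_true]
      by_cases hlt : ic < md
      · rw [if_pos hlt, ih _ _ _ ht]
        have : (md - ic).toNat = (md - (ic + 1)).toNat + 1 := by omega
        simp [List.takeWhile_cons, List.dropWhile_cons, hpc, this, List.take_succ_cons, hmem]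
      · rw [if_neg hlt, ih _ _ _ ht]
        have h0 : (md - ic).toNat = 0 := by omega
        simp [List.takeWhile_cons, List.dropWhile_cons, hpc, h0, hmem]

lemma B_eq (text : String) (md mdec : Int) :
    limit_frequency_input_old_alt text md mdec =
      String.ofList (pvForm (text.toList.filter pvQ) md.toNat mdec.toNat) := by
  unfold limit_frequency_input_old_alt
  rw [altGo_skip]
  rw [aux_false md mdec _ 0 0 [] (fun c hc => (List.mem_filter.mp hc).2)]
  simp [pvForm]

-- ===== VERDICT (by name: the statement is the Claim_ definition above) =====
theorem limit_frequency_input_old_spec : Claim_equal_limit_frequency_input_old := by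
  intro text md mdec _hdom hpre
  unfold Spec_limit_frequency_input_old
  rw [A_eq text md mdec hpre.1 hpre.2, B_eq text md mdec]
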